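-- pv_equiv track=rewrite | github.com/pypi-data/pypi-mirror-194 | packages/excel-exporter-bms/excel_exporter_bms-0.1.5.tar.gz/excel_exporter_bms-0.1.5/excel_exporter/configuration/are_strings_grouped.py | are_strings_grouped
-- ===== SOURCE A (Python) =====
-- from typing import List
--
-- def are_strings_grouped(list_of_strings: List[str]) -> bool:
--     # First find the number of expected changes
--     n_unique_strings = len(set(list_of_strings))
--     n_expected_changes = n_unique_strings - 1
--     # Then find the real number of changes
--     groups_changes = [
--         1
--         for former, latter in zip(list_of_strings[:-1], list_of_strings[1:])
--         if former != latter
--     ]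
--     n_real_changes = sum(groups_changes)
--     # Finally compare them
--     return n_real_changes == n_expected_changes
-- ===== SOURCE B (Python) =====
-- def are_strings_grouped(list_of_strings):
--     """Single early-exit pass: a group 'reappears' iff a value differing from
--     the previous one was already seen."""
--     if not list_of_strings:
--         return True
--     prev = list_of_strings[0]
--     seen = {prev}
--     for x in list_of_strings[1:]:
--         if x != prev:
--             if x in seen:
--                 return False
--             seen.add(x)
--             prev = x
--     return True
-- ===== Notes on version B (the rewrite author's own statement) =====
-- stated objective: simpler
-- what changed: Instead of counting unique strings and counting adjacent transitions and comparing the two totals, B makes one early-exit pass keeping the previous element and a set of already-seen values, returning False as soon as a value reappears after a different one.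
-- intended difference: On the empty list A returns False (its expected-changes count is len(set)-1 = -1, which 0 real changes can never equal) while B returns True, the intended value since an empty list is trivially grouped. — e.g. on are_strings_grouped([]): A returns false, B returns true
import Mathlib
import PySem

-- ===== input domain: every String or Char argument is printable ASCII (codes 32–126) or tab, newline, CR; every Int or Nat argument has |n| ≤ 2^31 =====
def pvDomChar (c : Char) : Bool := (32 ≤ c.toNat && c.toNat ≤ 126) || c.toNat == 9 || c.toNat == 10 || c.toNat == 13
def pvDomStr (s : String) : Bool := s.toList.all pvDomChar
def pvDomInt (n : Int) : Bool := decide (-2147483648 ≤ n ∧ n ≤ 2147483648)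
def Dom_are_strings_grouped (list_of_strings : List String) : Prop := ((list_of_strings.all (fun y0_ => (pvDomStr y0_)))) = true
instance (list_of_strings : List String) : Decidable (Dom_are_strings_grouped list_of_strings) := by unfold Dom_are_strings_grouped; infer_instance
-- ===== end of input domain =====

-- B replaces A's two-count-and-compare (unique count vs adjacent-transition count) by a
-- single early-exit pass with a seen-set; on the empty list B returns the intended True
-- where A returns False (objective: simpler).

-- ===== PORT A =====
def are_strings_grouped (list_of_strings : List String) : Bool :=
  let n_unique_strings : Int := PySem.Set.len (PySem.Set.ofList list_of_strings)
  let n_expected_changes : Int := n_unique_strings - 1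
  let groups_changes : List Int :=
    ((PySem.List.slice list_of_strings none (some (-1))).zip
      (PySem.List.slice list_of_strings (some 1) none)).filterMap
      (fun p => if p.1 ≠ p.2 then some 1 else none)
  let n_real_changes : Int := groups_changes.sum
  decide (n_real_changes = n_expected_changes)

-- ===== PORT B =====
def are_strings_grouped_altGo (seen : PySem.Set String) (prev : String) :
    List String → Bool
  | [] => true
  | x :: rest =>
    if x ≠ prev then
      if PySem.Set.contains seen x then false
      else are_strings_grouped_altGo (PySem.Set.add seen x) x rest
    else are_strings_grouped_altGo seen prev rest

def are_strings_grouped_alt (list_of_strings : List String) : Bool :=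
  match list_of_strings with
  | [] => true
  | prev :: rest => are_strings_grouped_altGo (PySem.Set.add PySem.Set.empty prev) prev rest

-- ===== PRECONDITION & SPEC =====
-- On the empty list A returns False (its expected-changes count is len(set)-1 = -1, which 0
-- real changes can never equal) while B returns True, the intended value since an empty list
-- is trivially grouped.
def D_are_strings_grouped (list_of_strings : List String) : Prop := list_of_strings = []
instance (list_of_strings : List String) : Decidable (D_are_strings_grouped list_of_strings) := by unfold D_are_strings_grouped; infer_instance

def Spec_are_strings_grouped (list_of_strings : List String) (out : Bool) : Prop :=
  ¬ D_are_strings_grouped list_of_strings → out = are_strings_grouped_alt list_of_strings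
instance (list_of_strings : List String) (out : Bool) : Decidable (Spec_are_strings_grouped list_of_strings out) := by unfold Spec_are_strings_grouped; infer_instance

def pvDiffWitness_are_strings_grouped : List String := []
def pvDiffWitnessOut_are_strings_grouped : Bool × Bool := (false, true)

-- ===== CLAIM (what is proved, stated in full; the proofs are below) =====
def Claim_unchanged_are_strings_grouped : Prop := ∀ (list_of_strings : List String), Dom_are_strings_grouped list_of_strings → Spec_are_strings_grouped list_of_strings (are_strings_grouped list_of_strings)
def Claim_changed_are_strings_grouped : Prop := Dom_are_strings_grouped (pvDiffWitness_are_strings_grouped) ∧ D_are_strings_grouped (pvDiffWitness_are_strings_grouped) ∧ are_strings_grouped (pvDiffWitness_are_strings_grouped) = pvDiffWitnessOut_are_strings_grouped.1 ∧ are_strings_grouped_alt (pvDiffWitness_are_strings_grouped) = pvDiffWitnessOut_are_strings_grouped.2 ∧ pvDiffWitnessOut_are_strings_grouped.1 ≠ pvDiffWitnessOut_are_strings_grouped.2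
def Claim_exact_are_strings_grouped : Prop := ∀ (list_of_strings : List String), Dom_are_strings_grouped list_of_strings → D_are_strings_grouped list_of_strings → are_strings_grouped list_of_strings ≠ are_strings_grouped_alt list_of_strings

-- ===== LEMMAS AND PROOFS =====

/-- Number of adjacent changes in a list. -/
def pvChanges : List String → Nat
  | [] => 0
  | [_] => 0
  | a :: b :: r => (if a ≠ b then 1 else 0) + pvChanges (b :: r)

theorem pvChanges_sum (xs : List String) :
    ((xs.dropLast.zip xs.tail).filterMap
      (fun p : String × String => if p.1 ≠ p.2 then some (1 : Int) else none)).sum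
      = (pvChanges xs : Int) := by
  match xs with
  | [] => simp [pvChanges]
  | [a] => simp [pvChanges]
  | a :: b :: r =>
    have ih := pvChanges_sum (b :: r)
    by_cases h : a = b <;> simp [pvChanges, h] at ih ⊢ <;> omega

theorem pvLen_add_le (rest : List String) (seen : PySem.Set String) (prev : String)
    (hmem : prev ∈ seen) :
    (PySem.Set.update seen rest).length ≤ seen.length + pvChanges (prev :: rest) := by
  induction rest generalizing seen prev with
  | nil => simp [PySem.Set.update, pvChanges]
  | cons x r ih =>
    have hupd : PySem.Set.update seen (x :: r) = PySem.Set.update (PySem.Set.add seen x) r := rfl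
    by_cases hx : x = prev
    · subst hx
      have : PySem.Set.add seen x = seen := by
        simp [PySem.Set.add, PySem.Set.contains, hmem]
      rw [hupd, this]
      simpa [pvChanges] using ih seen x hmem
    · rw [hupd]
      have hlen : (PySem.Set.add seen x).length ≤ seen.length + 1 := by
        simp only [PySem.Set.add]; split <;> simp
      have hx' : x ∈ PySem.Set.add seen x := by
        simp [PySem.Set.mem_add]
      calc (PySem.Set.update (PySem.Set.add seen x) r).length
          ≤ (PySem.Set.add seen x).length + pvChanges (x :: r) := ih _ x hx'
        _ ≤ seen.length + 1 + pvChanges (x :: r) := by omega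
        _ = seen.length + pvChanges (prev :: x :: r) := by
            simp [pvChanges, Ne.symm hx]; omega

theorem pvGo_eq (rest : List String) (seen : PySem.Set String) (prev : String)
    (hmem : prev ∈ seen) :
    are_strings_grouped_altGo seen prev rest
      = decide (pvChanges (prev :: rest) + seen.length = (PySem.Set.update seen rest).length) := by
  induction rest generalizing seen prev with
  | nil => simp [are_strings_grouped_altGo, pvChanges, PySem.Set.update]
  | cons x r ih =>
    have hupd : PySem.Set.update seen (x :: r) = PySem.Set.update (PySem.Set.add seen x) r := rfl
    by_cases hx : x = prev
    · subst hx
      have hadd : PySem.Set.add seen x = seen := by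
        simp [PySem.Set.add, PySem.Set.contains, hmem]
      have hch : pvChanges (x :: x :: r) = pvChanges (x :: r) := by simp [pvChanges]
      rw [show are_strings_grouped_altGo seen x (x :: r) = are_strings_grouped_altGo seen x r by
        simp [are_strings_grouped_altGo]]
      rw [hupd, hadd, hch]
      exact ih seen x hmem
    · by_cases hmx : PySem.Set.contains seen x = true
      · have hxseen : x ∈ seen := by simpa using hmx
        have hadd : PySem.Set.add seen x = seen := by
          simp [PySem.Set.add, hxseen]
        have hle : (PySem.Set.update seen r).length ≤ seen.length + pvChanges (x :: r) :=
          pvLen_add_le r seen x hxseen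
        have hch : pvChanges (prev :: x :: r) = 1 + pvChanges (x :: r) := by
          simp [pvChanges, Ne.symm hx]
        rw [show are_strings_grouped_altGo seen prev (x :: r) = false by
          simp [are_strings_grouped_altGo, hx, hxseen]]
        rw [hupd, hadd]
        have : ¬ (pvChanges (prev :: x :: r) + seen.length = (PySem.Set.update seen r).length) := by
          omega
        simp [this]
      · have hxnot : x ∉ seen := by simpa using hmx
        have hlen : (PySem.Set.add seen x).length = seen.length + 1 := by
          simp [PySem.Set.add, hxnot]
        have hx' : x ∈ PySem.Set.add seen x := by simp [PySem.Set.mem_add]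
        have hch : pvChanges (prev :: x :: r) = 1 + pvChanges (x :: r) := by
          simp [pvChanges, Ne.symm hx]
        rw [show are_strings_grouped_altGo seen prev (x :: r)
            = are_strings_grouped_altGo (PySem.Set.add seen x) x r by
          simp [are_strings_grouped_altGo, hx, hxnot]]
        rw [ih (PySem.Set.add seen x) x hx', hupd, hlen, hch]
        simp only [decide_eq_decide]
        omega

theorem are_strings_grouped_eq_alt (x : String) (t : List String) :
    are_strings_grouped (x :: t) = are_strings_grouped_alt (x :: t) := by
  have hofList : PySem.Set.ofList (x :: t)
      = PySem.Set.update (PySem.Set.add PySem.Set.empty x) t := rfl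
  have hx : x ∈ PySem.Set.add PySem.Set.empty x := by simp
  have hlen1 : (PySem.Set.add PySem.Set.empty x).length = 1 := by
    simp [PySem.Set.add, PySem.Set.empty, PySem.Set.contains]
  show _ = are_strings_grouped_altGo (PySem.Set.add PySem.Set.empty x) x t
  rw [pvGo_eq t _ x hx, hlen1]
  unfold are_strings_grouped
  simp only [PySem.List.slice_to_neg_one, PySem.List.slice_from_one]
  rw [pvChanges_sum (x :: t), hofList]
  rw [show PySem.Set.len (PySem.Set.update (PySem.Set.add PySem.Set.empty x) t)
      = ((PySem.Set.update (PySem.Set.add PySem.Set.empty x) t).length : Int) from rfl]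
  simp only [decide_eq_decide]
  omega

-- ===== VERDICT (by name: the statement is the Claim_ definition above) =====
theorem are_strings_grouped_spec : Claim_unchanged_are_strings_grouped := by
  intro xs _ hD
  match xs with
  | [] => exact absurd rfl hD
  | x :: t => exact are_strings_grouped_eq_alt x t

theorem are_strings_grouped_changed : Claim_changed_are_strings_grouped := by
  unfold Claim_changed_are_strings_grouped; decide

theorem are_strings_grouped_tight : Claim_exact_are_strings_grouped := by
  intro xs _ hD
  subst hD
  decide
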